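-- pv_equiv track=rewrite | github.com/spcl/substation | config_selection/ops.py | restrict_layout_configs
-- ===== SOURCE A (Python) =====
-- def bare_layout_iterator(layouts, order=None):
--     """Yield layouts without the dict.
--
--     The order is that given by layouts.keys() if order is None.
--
--     """
--     if order is None:
--         order = list(layouts.keys())
--     layouts = [layouts[var] for var in order]
--     yield from zip(*layouts)
--
-- def filter_layouts(x, vars):
--     """Filter an iterable to contain only vars in vars.
--
--     If x is None, this just returns None.
--
--     Works with lists/tuples (will filter directly) and dicts (filter keys).
--
--     If the filtering makes x empty, returns None.
--
--     """
--     if x is None: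
--         return None
--     vars = set(vars)
--     if type(x) in (list, tuple, set):
--         x = type(x)([var for var in x if var in vars])
--     elif type(x) is dict:
--         x = {var: x[var] for var in x if var in vars}
--     else:
--         raise ValueError(f'Do not know how to filter {x}')
--     if not x:
--         return None
--     else:
--         return x
--
-- def restrict_layout_configs(layouts, cfg):
--     """Restrict layouts to contain only layouts that match cfg.
--
--     cfg is a dict mapping variables to a fixed layout. It is allowable
--     for cfg to have variables that are not in layouts: they will be
--     ignored.
--
--     """
--     if not cfg:
--         return layouts
--     cfg = filter_layouts(cfg, layouts.keys())
--     if not cfg: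
--         return layouts
--     vars = list(layouts.keys())
--     restrict_vars = list(cfg.keys())
--     restrict_cfg = tuple(cfg[var] for var in restrict_vars)
--     restrict_indices = [vars.index(var) for var in restrict_vars]
--     restrict_indices_cfg = tuple(zip(restrict_indices, restrict_cfg))
--     new_layouts = {var: [] for var in vars}
--     for bare_layout in bare_layout_iterator(layouts, order=vars):
--         if all(bare_layout[idx] == layout for idx, layout in restrict_indices_cfg):
--             for var, layout in zip(vars, bare_layout):
--                 new_layouts[var].append(layout)
--     return new_layouts
-- ===== SOURCE B (Python) =====
-- def restrict_layout_configs(layouts, cfg):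
--     """Index-set filtering: never materializes rows; starts from all row indices,
--     prunes the surviving indices once per constrained column, then gathers every
--     column by the surviving indices."""
--     if not cfg:
--         return layouts
--     cfg = {var: cfg[var] for var in cfg if var in layouts}
--     if not cfg:
--         return layouts
--     order = list(layouts.keys())
--     n = min(len(layouts[v]) for v in order)
--     idxs = list(range(n))
--     for var, val in cfg.items():
--         col = layouts[var]
--         idxs = [i for i in idxs if col[i] == val]
--     return {var: [layouts[var][i] for i in idxs] for var in order}
-- ===== Notes on version B (the rewrite author's own statement) =====
-- stated objective: faster
-- what changed: A zips the columns into row tuples and, for each matching row, appends every field to a per-variable dict; B never builds rows: it keeps a list of surviving row indices, prunes it once per constrained column, and gathers each column by the surviving indices, so unconstrained columns are only touched for the survivors.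
import Mathlib
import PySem

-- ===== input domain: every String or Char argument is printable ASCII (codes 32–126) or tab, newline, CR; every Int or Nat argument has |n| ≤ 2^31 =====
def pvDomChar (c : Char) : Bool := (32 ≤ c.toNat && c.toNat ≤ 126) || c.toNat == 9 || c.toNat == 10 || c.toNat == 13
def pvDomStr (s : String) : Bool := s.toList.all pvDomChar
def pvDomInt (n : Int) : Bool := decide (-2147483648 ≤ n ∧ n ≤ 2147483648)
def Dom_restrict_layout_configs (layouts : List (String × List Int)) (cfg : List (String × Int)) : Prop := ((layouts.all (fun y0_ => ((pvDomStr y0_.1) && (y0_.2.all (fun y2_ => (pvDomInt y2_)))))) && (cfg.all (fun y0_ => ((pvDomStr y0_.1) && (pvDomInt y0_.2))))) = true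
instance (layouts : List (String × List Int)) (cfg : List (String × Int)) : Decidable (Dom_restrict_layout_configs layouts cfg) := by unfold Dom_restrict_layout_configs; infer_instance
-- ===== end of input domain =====

-- zip(*cols) for integer columns (Python zip truncates to the shortest column); used by port A
def pvZip (cols : List (List Int)) : List (List Int) :=
  (List.range (((cols.map List.length).min?).getD 0)).map (fun i => cols.map (fun col => col.getD i 0))

-- B replaces A's row-zipping loop (build every row tuple, test it, append each field to the dict)
-- by index-set filtering: prune a list of surviving row indices per constrained column, then
-- gather each column by the surviving indices; equal results, measurably faster on large inputs.

-- ===== PORT A =====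
def restrict_layout_configs (layouts : List (String × List Int)) (cfg : List (String × Int)) : List (String × List Int) :=
  if cfg.isEmpty then layouts else
  -- filter_layouts(cfg, layouts.keys()): dict comprehension over cfg's keys
  let cfgF : List (String × Int) :=
    ((PySem.Set.ofList (cfg.map (·.1))).filter
        (fun v => PySem.Set.contains (PySem.Set.ofList (layouts.map (·.1))) v)).map
      (fun v => (v, PySem.Dict.getD (PySem.Dict.mk cfg) v 0))
  if cfgF.isEmpty then layouts else
  let vars := PySem.Set.ofList (layouts.map (·.1))
  let restrict_vars := cfgF.map (·.1)
  let restrict_cfg := restrict_vars.map (fun v => PySem.Dict.getD (PySem.Dict.mk cfgF) v 0)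
  let restrict_indices := restrict_vars.map (fun v => (PySem.List.index? vars v).getD 0)
  let restrict_indices_cfg := restrict_indices.zip restrict_cfg
  -- bare_layout_iterator(layouts, order=vars) = zip(*[layouts[v] for v in vars])
  let rows := pvZip (vars.map (fun v => PySem.Dict.getD (PySem.Dict.mk layouts) v []))
  let init : PySem.Dict String (List Int) := PySem.Dict.mk (vars.map (fun v => (v, ([] : List Int))))
  (rows.foldl (fun d row =>
      if restrict_indices_cfg.all (fun p => (PySem.List.pyGet? row (p.1 : Int)).getD 0 == p.2)
      then (vars.zip row).foldl (fun d2 q => d2.modify q.1 [] (· ++ [q.2])) d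
      else d) init).items

-- ===== PORT B =====
def restrict_layout_configs_alt (layouts : List (String × List Int)) (cfg : List (String × Int)) : List (String × List Int) :=
  if cfg.isEmpty then layouts else
  let cfgF : List (String × Int) :=
    ((PySem.Set.ofList (cfg.map (·.1))).filter
        (fun v => PySem.Set.contains (PySem.Set.ofList (layouts.map (·.1))) v)).map
      (fun v => (v, PySem.Dict.getD (PySem.Dict.mk cfg) v 0))
  if cfgF.isEmpty then layouts else
  let order := PySem.Set.ofList (layouts.map (·.1))
  -- min(...) over a nonempty list here (cfgF nonempty forces a key of layouts); ported as min?.getD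
  let n : Nat := ((order.map (fun v => (PySem.Dict.getD (PySem.Dict.mk layouts) v []).length)).min?).getD 0
  let idxs0 := PySem.List.pyRange 0 (n : Int) 1
  let idxs := cfgF.foldl (fun idxs p =>
      idxs.filter (fun i =>
        (PySem.List.pyGet? (PySem.Dict.getD (PySem.Dict.mk layouts) p.1 []) i).getD 0 == p.2)) idxs0
  order.map (fun v =>
    (v, idxs.map (fun i => (PySem.List.pyGet? (PySem.Dict.getD (PySem.Dict.mk layouts) v []) i).getD 0)))

-- ===== PRECONDITION & SPEC =====
def Spec_restrict_layout_configs (layouts : List (String × List Int)) (cfg : List (String × Int)) (out : List (String × List Int)) : Prop := out = restrict_layout_configs_alt layouts cfg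
instance (layouts : List (String × List Int)) (cfg : List (String × Int)) (out : List (String × List Int)) : Decidable (Spec_restrict_layout_configs layouts cfg out) := by unfold Spec_restrict_layout_configs; infer_instance

-- ===== CLAIM (what is proved, stated in full; the proofs are below) =====
def Claim_equal_restrict_layout_configs : Prop := ∀ (layouts : List (String × List Int)) (cfg : List (String × Int)), Dom_restrict_layout_configs layouts cfg → Spec_restrict_layout_configs layouts cfg (restrict_layout_configs layouts cfg)

-- ===== LEMMAS AND PROOFS =====

theorem length_mem_pvZip {cols : List (List Int)} {row : List Int} (h : row ∈ pvZip cols) :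
    row.length = cols.length := by
  simp only [pvZip, List.mem_map] at h
  obtain ⟨i, -, rfl⟩ := h
  simp

theorem zip_filter_eq (vars : List String) (row : List Int) (j : Nat) (hn : vars.Nodup)
    (hj : j < vars.length) (hl : row.length = vars.length) :
    (vars.zip row).filter (fun p => p.1 == vars[j]) = [(vars[j], row.getD j 0)] := by
  induction vars generalizing row j with
  | nil => simp at hj
  | cons v vs ih =>
    match row with
    | [] => simp at hl
    | x :: xs =>
      simp only [List.nodup_cons] at hn
      cases j with
      | zero =>
        simp only [List.zip_cons_cons, List.filter_cons, List.getElem_cons_zero, beq_self_eq_true,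
          if_pos]
        have : (vs.zip xs).filter (fun p => p.1 == v) = [] := by
          rw [List.filter_eq_nil_iff]
          intro p hp
          have := List.of_mem_zip hp
          simp only [beq_iff_eq]
          exact fun he => hn.1 (he ▸ this.1)
        simp [this]
      | succ j =>
        have hjv : j < vs.length := by simpa using hj
        have hne : (v == (v :: vs)[j+1]) = false := by
          simp only [List.getElem_cons_succ, beq_eq_false_iff_ne]
          intro he; exact hn.1 (he ▸ vs.getElem_mem hjv)
        simp only [List.zip_cons_cons, List.filter_cons, List.getElem_cons_succ] at hne ⊢
        rw [hne, if_neg (by simp)]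
        simpa using ih xs j hn.2 hjv (by simpa using hl)

theorem getD_mk_nil (vars : List String) (c : String) :
    (PySem.Dict.mk (vars.map (fun v => (v, ([] : List Int))))).getD c [] = [] := by
  induction vars with
  | nil => simp [PySem.Dict.getD, PySem.Dict.get?]
  | cons v vs ih =>
    rw [List.map_cons, PySem.Dict.getD_eq_get?_getD, PySem.Dict.get?_mk_cons]
    by_cases h : (v == c) = true
    · simp [h]
    · rw [if_neg h, ← PySem.Dict.getD_eq_get?_getD, ih]

-- characterisation of A's accumulation loop: column j of the result is the j-th field of each kept row
theorem main_core (vars : List String) (hn : vars.Nodup) (cols : List (List Int))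
    (hc : cols.length = vars.length) (P : List Int → Bool) :
    ((pvZip cols).foldl (fun d row =>
        if P row then (vars.zip row).foldl (fun d2 q => d2.modify q.1 [] (· ++ [q.2])) d else d)
      (PySem.Dict.mk (vars.map (fun v => (v, ([] : List Int)))))).items
    = (PySem.List.enumerate vars 0).map
        (fun q => (q.2, ((pvZip cols).filter P).map (fun row => (PySem.List.pyGet? row q.1).getD 0))) := by
  rw [← List.foldl_filter, ← List.foldl_flatMap]
  set kept := (pvZip cols).filter P with hkept
  set L := kept.flatMap (fun row => vars.zip row) with hL
  set init := PySem.Dict.mk (vars.map (fun v => (v, ([] : List Int)))) with hinit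
  have hkinit : init.keys = vars := by
    simp [hinit, PySem.Dict.keys, List.map_map, Function.comp_def]
  have hmemL : ∀ p ∈ L, p.1 ∈ vars := by
    intro p hp
    simp only [hL, List.mem_flatMap] at hp
    obtain ⟨row, -, hz⟩ := hp
    exact (List.of_mem_zip hz).1
  have hkeys : (L.foldl (fun d p => d.modify p.1 [] (· ++ [p.2])) init).keys = vars := by
    rw [PySem.Dict.keys_foldl_modify_key, hkinit, PySem.Set.update_eq_append_filter]
    have : (PySem.Set.ofList (L.map (·.1))).filter (fun y => !(PySem.Set.contains vars y)) = [] := by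
      rw [List.filter_eq_nil_iff]
      intro y hy
      have hyL : y ∈ L.map (·.1) := (PySem.Set.mem_ofList _ _).1 hy
      obtain ⟨p, hp, rfl⟩ := List.mem_map.1 hyL
      have hm := hmemL p hp
      simp
      exact hm
    rw [this, List.append_nil]
  have hnd : (L.foldl (fun d p => d.modify p.1 [] (· ++ [p.2])) init).keys.Nodup := by
    apply PySem.Dict.nodup_keys_foldl_modify_key
    rw [hkinit]; exact hn
  rw [PySem.Dict.items_eq_map_keys _ hnd ([] : List Int), hkeys]
  apply List.ext_getElem
  · simp [PySem.List.length_enumerate]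
  intro j h1 h2
  have hj : j < vars.length := by simpa using h1
  rw [List.getElem_map, List.getElem_map, PySem.List.getElem_enumerate]
  have hgetD : (L.foldl (fun d p => d.modify p.1 [] (· ++ [p.2])) init).getD vars[j] []
      = (L.filter (fun p => p.1 == vars[j])).map (·.2) := by
    rw [PySem.Dict.getD_foldl_modify_append, hinit, getD_mk_nil]
    simp
  rw [hgetD]
  have hcol : (L.filter (fun p => p.1 == vars[j])).map (·.2)
      = kept.map (fun row => row.getD j 0) := by
    rw [hL, List.filter_flatMap, List.map_flatMap]
    rw [List.map_eq_flatMap]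
    apply List.flatMap_congr
    intro row hrow
    have hl : row.length = vars.length := by
      rw [length_mem_pvZip (List.mem_of_mem_filter hrow), hc]
    rw [zip_filter_eq vars row j hn hj hl]
    simp
  rw [hcol]
  dsimp only
  congr 1
  apply List.map_congr_left
  intro row _hrow
  simp [PySem.List.pyGet?_natCast, List.getD]

theorem ric_eq (cfgF : List (String × Int)) (h : (cfgF.map (·.1)).Nodup) (f : String → Nat) :
    ((cfgF.map (·.1)).map f).zip ((cfgF.map (·.1)).map (fun v => PySem.Dict.getD (PySem.Dict.mk cfgF) v 0))
    = cfgF.map (fun p => (f p.1, p.2)) := by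
  rw [List.zip_map', List.map_map]
  apply List.map_congr_left
  intro p hp
  simp only [Function.comp]
  congr 1
  exact PySem.Dict.getD_of_mem_items (k := p.1) (v := p.2) (d := PySem.Dict.mk cfgF) hp h 0

theorem all_congr_mem {α : Type} (l : List α) (f g : α → Bool) (h : ∀ x ∈ l, f x = g x) :
    l.all f = l.all g := by
  induction l with
  | nil => rfl
  | cons a t ih =>
    simp only [List.all_cons]
    rw [h a (by simp), ih (fun x hx => h x (by simp [hx]))]

-- B's successive filters collapse into one filter by the conjunction of all constraints
theorem foldl_filter_all {α β : Type} (ps : List β) (q : β → α → Bool) (l0 : List α) :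
    ps.foldl (fun l p => l.filter (q p)) l0 = l0.filter (fun i => ps.all (fun p => q p i)) := by
  induction ps generalizing l0 with
  | nil => simp
  | cons p ps ih => simp [ih, List.filter_filter, Bool.and_comm]

-- the bridge: A's row-filter-then-project result equals B's index-filter-then-gather result
theorem bridge (vars : List String) (colOf : String → List Int)
    (cfgF : List (String × Int)) (hmem : ∀ p ∈ cfgF, p.1 ∈ vars) :
    (PySem.List.enumerate vars 0).map
      (fun q => (q.2, ((pvZip (vars.map colOf)).filter
          (fun row => cfgF.all (fun p =>
            (PySem.List.pyGet? row (((PySem.List.index? vars p.1).getD 0 : Nat) : Int)).getD 0 == p.2))).map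
        (fun row => (PySem.List.pyGet? row q.1).getD 0)))
    = vars.map (fun v =>
        (v, ((PySem.List.pyRange 0 (((((vars.map colOf).map List.length).min?).getD 0 : Nat) : Int) 1).filter
              (fun i => cfgF.all (fun p => (PySem.List.pyGet? (colOf p.1) i).getD 0 == p.2))).map
            (fun i => (PySem.List.pyGet? (colOf v) i).getD 0))) := by
  set cols := vars.map colOf with hcols
  set n : Nat := (((cols.map List.length).min?).getD 0) with hn
  have hnle : ∀ c ∈ cols, n ≤ c.length := by
    intro c hc
    have hne : cols.map List.length ≠ [] := by
      simp only [ne_eq, List.map_eq_nil_iff]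
      intro hnil; rw [hnil] at hc; simp at hc
    obtain ⟨m, hm⟩ := List.isSome_min?_of_ne_nil hne |> Option.isSome_iff_exists.mp
    have := (List.min?_eq_some_iff.mp hm).2 c.length (List.mem_map_of_mem hc)
    simp [hn, hm]; omega
  -- both sides filter the same index list by the same predicate and project the same value
  have hrange : PySem.List.pyRange 0 (n : Int) 1 = (List.range n).map (fun k => ((k : Nat) : Int)) := by
    rw [PySem.List.pyRange_one]
    simp
  have hzip : pvZip cols = (List.range n).map (fun i => cols.map (fun col => col.getD i 0)) := by
    rw [pvZip, hn]
  apply List.ext_getElem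
  · simp [PySem.List.length_enumerate]
  intro j h1 h2
  have hj : j < vars.length := by simpa using h1
  rw [List.getElem_map, List.getElem_map, PySem.List.getElem_enumerate]
  have hcolj : cols[j]'(by simpa [hcols] using hj) = colOf vars[j] := by
    simp [hcols]
  -- index lemma: for p ∈ cfgF and i < n, A's row lookup is B's column lookup
  have key : ∀ (p : String × Int), p ∈ cfgF → ∀ i : Nat, i < n →
      (PySem.List.pyGet? (cols.map (fun col => col.getD i 0))
          (((PySem.List.index? vars p.1).getD 0 : Nat) : Int)).getD 0
      = (PySem.List.pyGet? (colOf p.1) ((i : Nat) : Int)).getD 0 := by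
    intro p hp i hi
    obtain ⟨jp, hjp⟩ := Option.isSome_iff_exists.mp ((PySem.List.index?_isSome_iff vars p.1).mpr (hmem p hp))
    obtain ⟨hjlt, hveq, -⟩ := PySem.List.getElem_of_index?_eq_some hjp
    have hjc : jp < cols.length := by simpa [hcols] using hjlt
    rw [hjp]
    simp only [Option.getD_some]
    rw [PySem.List.pyGet?_natCast, PySem.List.pyGet?_natCast]
    rw [List.getElem?_map]
    have h1' : cols[jp]? = some cols[jp] := List.getElem?_eq_getElem hjc
    have hlen : i < (colOf p.1).length := by
      have := hnle (colOf p.1) (by rw [hcols]; exact List.mem_map_of_mem (hveq ▸ List.getElem_mem hjlt)); omega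
    rw [h1']
    have hcjp : cols[jp] = colOf p.1 := by simp [hcols]; rw [hveq]
    rw [List.getElem?_eq_getElem hlen]
    simp [hcjp, List.getD, List.getElem?_eq_getElem hlen]
  -- rewrite both sides as maps over filtered List.range n
  simp only [hzip, hrange, List.filter_map, List.map_map]
  have hfilt : (List.range n).filter
        ((fun row => cfgF.all (fun p =>
            (PySem.List.pyGet? row (((PySem.List.index? vars p.1).getD 0 : Nat) : Int)).getD 0 == p.2))
          ∘ (fun i => cols.map (fun col => col.getD i 0)))
      = (List.range n).filter
        ((fun i => cfgF.all (fun p => (PySem.List.pyGet? (colOf p.1) i).getD 0 == p.2))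
          ∘ (fun k => ((k : Nat) : Int))) := by
    apply List.filter_congr
    intro i hi
    have hin : i < n := List.mem_range.mp hi
    simp only [Function.comp]
    apply all_congr_mem
    intro p hp
    rw [key p hp i hin]
  rw [hfilt]
  congr 1
  apply List.map_congr_left
  intro i hi
  have hin : i < n := List.mem_range.mp (List.mem_of_mem_filter hi)
  simp only [Function.comp, zero_add]
  rw [PySem.List.pyGet?_natCast]
  have hlen : i < (colOf vars[j]).length := by
    have := hnle (colOf vars[j]) (by rw [hcols]; exact List.mem_map_of_mem (List.getElem_mem hj)); omega
  rw [List.getElem?_map, List.getElem?_eq_getElem (by simpa [hcols] using hj : j < cols.length)]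
  simp only [Option.map_some, Option.getD_some, hcolj]
  rw [PySem.List.pyGet?_natCast, List.getElem?_eq_getElem hlen]
  simp [List.getD, List.getElem?_eq_getElem hlen]

-- ===== VERDICT (by name: the statement is the Claim_ definition above) =====
theorem restrict_layout_configs_spec : Claim_equal_restrict_layout_configs := by
  intro layouts cfg _
  show restrict_layout_configs layouts cfg = restrict_layout_configs_alt layouts cfg
  simp only [restrict_layout_configs, restrict_layout_configs_alt]
  by_cases h1 : cfg.isEmpty
  · simp [h1]
  rw [if_neg h1, if_neg h1]
  set cfgF : List (String × Int) :=
    ((PySem.Set.ofList (cfg.map (·.1))).filter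
        (fun v => PySem.Set.contains (PySem.Set.ofList (layouts.map (·.1))) v)).map
      (fun v => (v, PySem.Dict.getD (PySem.Dict.mk cfg) v 0)) with hcfgF
  by_cases h2 : cfgF.isEmpty
  · simp [h2]
  rw [if_neg h2, if_neg h2]
  set vars := PySem.Set.ofList (layouts.map (·.1)) with hvars
  have hndk : (cfgF.map (·.1)).Nodup := by
    rw [hcfgF, List.map_map]
    have : ((fun x : String × Int => x.1) ∘ fun v => (v, PySem.Dict.getD (PySem.Dict.mk cfg) v 0))
        = fun v => v := rfl
    rw [this, List.map_id']
    exact (PySem.Set.nodup_ofList _).filter _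
  have hmem : ∀ p ∈ cfgF, p.1 ∈ vars := by
    intro p hp
    rw [hcfgF] at hp
    obtain ⟨v, hv, rfl⟩ := List.mem_map.1 hp
    have := List.of_mem_filter hv
    exact (PySem.Set.contains_iff _ _).1 this
  rw [ric_eq cfgF hndk (fun v => (PySem.List.index? vars v).getD 0)]
  rw [main_core vars (PySem.Set.nodup_ofList _) _ (by simp) _]
  rw [foldl_filter_all]
  have := bridge vars (fun v => PySem.Dict.getD (PySem.Dict.mk layouts) v []) cfgF hmem
  simp only [List.all_map, Function.comp_def, List.map_map] at this ⊢
  exact this
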